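-- pv_equiv track=rewrite | github.com/demeth0/REPO_CS_P2024 | Python Project/Partiel P2023/Puissance4.py | verification_diagonale_basgauche_hautedroite
-- ===== SOURCE A (Python) =====
-- def verification_diagonale_basgauche_hautedroite(Colonne,Ligne,Symbole,Plateau_de_jeu): #ORIGINAL
--     Quatre_Aligne = False
--     Recurrence = 0
--     for indice_Colonne in range(Colonne-3,Colonne+4):
--         for indice_Ligne in range(Ligne+3,Ligne-4,-1):
--             if (indice_Colonne >= 0 and indice_Ligne >= 0 and indice_Ligne < len(Plateau_de_jeu) and indice_Colonne < len(Plateau_de_jeu[Ligne])):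
--                 if ((len(Plateau_de_jeu)-1) - indice_Ligne - indice_Colonne) == ((len(Plateau_de_jeu)-1) - Ligne - Colonne):
--                     if (Plateau_de_jeu[indice_Ligne][indice_Colonne] == Symbole):
--                         Recurrence +=1
--                         if Recurrence == 4:
--                             Quatre_Aligne = True
--                     else :
--                         Recurrence = 0
--     return Quatre_Aligne
-- ===== SOURCE B (Python) =====
-- def verification_diagonale_basgauche_hautedroite(Colonne, Ligne, Symbole, Plateau_de_jeu):
--     # Walk the anti-diagonal directly: 7 cells instead of a 7x7 scan.
--     Quatre_Aligne = False
--     Recurrence = 0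
--     for d in range(-3, 4):
--         c = Colonne + d
--         r = Ligne - d
--         if c >= 0 and r >= 0 and r < len(Plateau_de_jeu) and c < len(Plateau_de_jeu[Ligne]):
--             if Plateau_de_jeu[r][c] == Symbole:
--                 Recurrence += 1
--                 if Recurrence == 4:
--                     Quatre_Aligne = True
--             else:
--                 Recurrence = 0
--     return Quatre_Aligne
-- ===== Notes on version B (the rewrite author's own statement) =====
-- stated objective: simpler
-- what changed: Replaces the nested 7x7 scan (which tests every cell of a square against the anti-diagonal equation) with a single 7-step loop over an offset d that walks the anti-diagonal cells (Colonne+d, Ligne-d) directly, dropping the diagonal-equation branch.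
import Mathlib
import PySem

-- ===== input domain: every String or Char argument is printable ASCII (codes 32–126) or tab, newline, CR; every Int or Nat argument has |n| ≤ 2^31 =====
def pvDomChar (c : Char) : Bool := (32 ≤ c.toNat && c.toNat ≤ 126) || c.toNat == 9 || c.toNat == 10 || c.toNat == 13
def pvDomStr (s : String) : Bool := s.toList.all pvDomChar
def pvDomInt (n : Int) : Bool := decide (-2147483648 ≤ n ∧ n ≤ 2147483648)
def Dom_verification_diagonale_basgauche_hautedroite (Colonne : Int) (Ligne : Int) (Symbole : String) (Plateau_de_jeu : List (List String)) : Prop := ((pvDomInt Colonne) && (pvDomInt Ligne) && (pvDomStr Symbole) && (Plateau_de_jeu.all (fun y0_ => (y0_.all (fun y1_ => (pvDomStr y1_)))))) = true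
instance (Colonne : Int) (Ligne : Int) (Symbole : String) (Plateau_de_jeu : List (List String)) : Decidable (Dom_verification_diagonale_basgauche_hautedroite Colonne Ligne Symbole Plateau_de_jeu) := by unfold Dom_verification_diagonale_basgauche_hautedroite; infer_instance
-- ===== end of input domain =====

-- B walks the 7 anti-diagonal cells directly (one loop over an offset d) instead of A's
-- nested 7x7 scan filtered by the diagonal equation; objective: simpler.

-- ===== PORT A =====
-- one inner-loop body of A; state Option (Bool × Int): none = the Python raised IndexError
def pvStepA (Colonne : Int) (Ligne : Int) (Symbole : String) (Plateau_de_jeu : List (List String)) (iC : Int) (st : Option (Bool × Int)) (iL : Int) : Option (Bool × Int) :=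
  match st with
  | none => none
  | some (q, r) =>
    if 0 ≤ iC ∧ 0 ≤ iL ∧ iL < (Plateau_de_jeu.length : Int) then
      match PySem.List.pyGet? Plateau_de_jeu Ligne with
      | none => none   -- len(Plateau_de_jeu[Ligne]) raises IndexError
      | some rowL =>
        if iC < (rowL.length : Int) then
          if ((Plateau_de_jeu.length : Int) - 1) - iL - iC = ((Plateau_de_jeu.length : Int) - 1) - Ligne - Colonne then
            match PySem.List.pyGet? Plateau_de_jeu iL with
            | none => none
            | some row =>
              match PySem.List.pyGet? row iC with
              | none => none   -- Plateau_de_jeu[iL][iC] raises IndexError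
              | some s =>
                if s == Symbole then
                  some (if r + 1 = 4 then true else q, r + 1)
                else some (q, 0)
          else some (q, r)
        else some (q, r)
    else some (q, r)

def verification_diagonale_basgauche_hautedroite (Colonne : Int) (Ligne : Int) (Symbole : String) (Plateau_de_jeu : List (List String)) : Bool :=
  match (PySem.List.pyRange (Colonne - 3) (Colonne + 4) 1).foldl
      (fun st iC => (PySem.List.pyRange (Ligne + 3) (Ligne - 4) (-1)).foldl
        (pvStepA Colonne Ligne Symbole Plateau_de_jeu iC) st)
      (some (false, 0)) with
  | some (q, _) => q
  | none => false   -- unreachable inside Pre_: the Python raised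

-- ===== PORT B =====
-- one loop body of Source B: offset d ↦ cell (Colonne+d, Ligne-d)
def pvStepB (Colonne : Int) (Ligne : Int) (Symbole : String) (Plateau_de_jeu : List (List String)) (st : Bool × Int) (d : Int) : Bool × Int :=
  if 0 ≤ Colonne + d ∧ 0 ≤ Ligne - d ∧ Ligne - d < (Plateau_de_jeu.length : Int) ∧
      Colonne + d < (((PySem.List.pyGet? Plateau_de_jeu Ligne).getD []).length : Int) then
    if ((PySem.List.pyGet? ((PySem.List.pyGet? Plateau_de_jeu (Ligne - d)).getD []) (Colonne + d)).getD "") == Symbole then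
      (if st.2 + 1 = 4 then true else st.1, st.2 + 1)
    else (st.1, 0)
  else st

def verification_diagonale_basgauche_hautedroite_alt (Colonne : Int) (Ligne : Int) (Symbole : String) (Plateau_de_jeu : List (List String)) : Bool :=
  ((PySem.List.pyRange (-3) 4 1).foldl (pvStepB Colonne Ligne Symbole Plateau_de_jeu) (false, 0)).1

-- ===== PRECONDITION & SPEC =====
-- Pre_ excludes exactly the inputs on which the Python A raises IndexError: either Ligne is not a
-- valid (possibly negative) row index while some cell of the scan passes the row-bounds guard
-- (so len(Plateau_de_jeu[Ligne]) raises), or a visited anti-diagonal cell passes the bounds guard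
-- but its own (shorter, ragged) row does not reach column Colonne+d (so Plateau_de_jeu[r][c] raises).
def Pre_verification_diagonale_basgauche_hautedroite (Colonne : Int) (Ligne : Int) (Symbole : String) (Plateau_de_jeu : List (List String)) : Prop :=
  ((-(Plateau_de_jeu.length : Int) ≤ Ligne ∧ Ligne < (Plateau_de_jeu.length : Int)) ∨
    Colonne < -3 ∨ Ligne < -3 ∨ Ligne > (Plateau_de_jeu.length : Int) + 2 ∨ Plateau_de_jeu.length = 0) ∧
  (∀ d ∈ ([-3, -2, -1, 0, 1, 2, 3] : List Int),
    (0 ≤ Colonne + d ∧ 0 ≤ Ligne - d ∧ Ligne - d < (Plateau_de_jeu.length : Int) ∧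
      Colonne + d < (((PySem.List.pyGet? Plateau_de_jeu Ligne).getD []).length : Int)) →
    Colonne + d < (((PySem.List.pyGet? Plateau_de_jeu (Ligne - d)).getD []).length : Int))
instance (Colonne : Int) (Ligne : Int) (Symbole : String) (Plateau_de_jeu : List (List String)) : Decidable (Pre_verification_diagonale_basgauche_hautedroite Colonne Ligne Symbole Plateau_de_jeu) := by unfold Pre_verification_diagonale_basgauche_hautedroite; infer_instance

def pvWitness_verification_diagonale_basgauche_hautedroite : Int × Int × String × List (List String) :=
  (0, 0, "X", [["X"]])

def Spec_verification_diagonale_basgauche_hautedroite (Colonne : Int) (Ligne : Int) (Symbole : String) (Plateau_de_jeu : List (List String)) (out : Bool) : Prop := out = verification_diagonale_basgauche_hautedroite_alt Colonne Ligne Symbole Plateau_de_jeu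
instance (Colonne : Int) (Ligne : Int) (Symbole : String) (Plateau_de_jeu : List (List String)) (out : Bool) : Decidable (Spec_verification_diagonale_basgauche_hautedroite Colonne Ligne Symbole Plateau_de_jeu out) := by unfold Spec_verification_diagonale_basgauche_hautedroite; infer_instance

-- ===== CLAIM (what is proved, stated in full; the proofs are below) =====
def Claim_equal_verification_diagonale_basgauche_hautedroite : Prop := ∀ (Colonne : Int) (Ligne : Int) (Symbole : String) (Plateau_de_jeu : List (List String)), Dom_verification_diagonale_basgauche_hautedroite Colonne Ligne Symbole Plateau_de_jeu → Pre_verification_diagonale_basgauche_hautedroite Colonne Ligne Symbole Plateau_de_jeu → Spec_verification_diagonale_basgauche_hautedroite Colonne Ligne Symbole Plateau_de_jeu (verification_diagonale_basgauche_hautedroite Colonne Ligne Symbole Plateau_de_jeu)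

-- ===== LEMMAS AND PROOFS =====

-- foldl with a pointwise-fixed accumulator stays fixed
theorem pvFoldlFix {α β : Type} (f : α → β → α) (l : List β) (a : α)
    (h : ∀ x ∈ l, f a x = a) : l.foldl f a = a := by
  induction l with
  | nil => rfl
  | cons x xs ih =>
    simp only [List.foldl_cons, h x (by simp)]
    exact ih (fun y hy => h y (List.mem_cons_of_mem _ hy))

theorem pv_inner_list (Ligne : Int) :
    PySem.List.pyRange (Ligne + 3) (Ligne - 4) (-1) =
      [Ligne + 3, Ligne + 2, Ligne + 1, Ligne, Ligne - 1, Ligne - 2, Ligne - 3] := by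
  rw [PySem.List.pyRange_neg_one, show (Ligne + 3 - (Ligne - 4)) = (7 : Int) by ring,
      show Int.toNat 7 = 7 from rfl]
  simp [List.range_succ]
  omega

theorem pv_outer_list (Colonne : Int) :
    PySem.List.pyRange (Colonne - 3) (Colonne + 4) 1 =
      [Colonne - 3, Colonne - 2, Colonne - 1, Colonne, Colonne + 1, Colonne + 2, Colonne + 3] := by
  rw [PySem.List.pyRange_one, show (Colonne + 4 - (Colonne - 3)) = (7 : Int) by ring,
      show Int.toNat 7 = 7 from rfl]
  simp [List.range_succ]
  omega

-- off-diagonal cells leave A's state unchanged (given row Ligne exists)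
theorem pvStepA_noop (Colonne Ligne : Int) (Symbole : String) (P : List (List String))
    (rowL : List String) (hrow : PySem.List.pyGet? P Ligne = some rowL)
    (iC iL : Int) (hne : iL + iC ≠ Ligne + Colonne) (st : Bool × Int) :
    pvStepA Colonne Ligne Symbole P iC (some st) iL = some st := by
  obtain ⟨q, r⟩ := st
  simp only [pvStepA, hrow]
  by_cases h1 : 0 ≤ iC ∧ 0 ≤ iL ∧ iL < (P.length : Int)
  · rw [if_pos h1]
    by_cases h2 : iC < (rowL.length : Int)
    · rw [if_pos h2, if_neg (by omega)]
    · rw [if_neg h2]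
  · rw [if_neg h1]

-- out-of-bounds cells (row guard already false) leave A's state unchanged
theorem pvStepA_oob (Colonne Ligne : Int) (Symbole : String) (P : List (List String))
    (iC iL : Int) (h : ¬ (0 ≤ iC ∧ 0 ≤ iL ∧ iL < (P.length : Int))) (st : Bool × Int) :
    pvStepA Colonne Ligne Symbole P iC (some st) iL = some st := by
  obtain ⟨q, r⟩ := st
  simp only [pvStepA]
  rw [if_neg h]

-- an out-of-bounds offset leaves B's state unchanged
theorem pvStepB_oob (Colonne Ligne : Int) (Symbole : String) (P : List (List String))
    (d : Int) (h : ¬ (0 ≤ Colonne + d ∧ 0 ≤ Ligne - d ∧ Ligne - d < (P.length : Int))) (st : Bool × Int) :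
    pvStepB Colonne Ligne Symbole P st d = st := by
  simp only [pvStepB]
  rw [if_neg (fun hc => h ⟨hc.1, hc.2.1, hc.2.2.1⟩)]

-- the one on-diagonal cell of column Colonne + d acts exactly like pvStepB at offset d
theorem pvStepA_diag (Colonne Ligne : Int) (Symbole : String) (P : List (List String))
    (rowL : List String) (hrow : PySem.List.pyGet? P Ligne = some rowL)
    (d : Int)
    (hP2 : (0 ≤ Colonne + d ∧ 0 ≤ Ligne - d ∧ Ligne - d < (P.length : Int) ∧
        Colonne + d < (((PySem.List.pyGet? P Ligne).getD []).length : Int)) →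
      Colonne + d < (((PySem.List.pyGet? P (Ligne - d)).getD []).length : Int))
    (iC iL : Int) (hiC : iC = Colonne + d) (hiL : iL = Ligne - d) (st : Bool × Int) :
    pvStepA Colonne Ligne Symbole P iC (some st) iL =
      some (pvStepB Colonne Ligne Symbole P st d) := by
  subst hiC; subst hiL
  obtain ⟨q, r⟩ := st
  simp only [pvStepA, pvStepB, hrow, Option.getD_some]
  by_cases hg : 0 ≤ Colonne + d ∧ 0 ≤ Ligne - d ∧ Ligne - d < (P.length : Int) ∧
      Colonne + d < ((rowL.length : Int))
  · obtain ⟨hg1, hg2, hg3, hg4⟩ := hg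
    have hP2' := hP2 (by rw [hrow]; exact ⟨hg1, hg2, hg3, by simpa using hg4⟩)
    have hrr := PySem.List.pyGet?_eq_some_getElem P hg2 hg3
    rw [hrr] at hP2'
    simp only [Option.getD_some] at hP2'
    have hcc := PySem.List.pyGet?_eq_some_getElem (P[(Ligne - d).toNat]) hg1 hP2'
    rw [if_pos ⟨hg1, hg2, hg3⟩, if_pos hg4, if_pos (by ring)]
    rw [if_pos (⟨hg1, hg2, hg3, hg4⟩ : 0 ≤ Colonne + d ∧ 0 ≤ Ligne - d ∧ Ligne - d < (P.length : Int) ∧ Colonne + d < ((rowL.length : Int)))]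
    rw [hrr]
    simp only [Option.getD_some, hcc]
    split_ifs <;> rfl
  · rw [if_neg hg]
    by_cases h1 : 0 ≤ Colonne + d ∧ 0 ≤ Ligne - d ∧ Ligne - d < (P.length : Int)
    · have h4 : ¬ Colonne + d < ((rowL.length : Int)) := fun h => hg ⟨h1.1, h1.2.1, h1.2.2, h⟩
      rw [if_pos h1, if_neg h4]
    · rw [if_neg h1]

-- A's whole inner loop for column Colonne + d equals one pvStepB step at offset d
theorem pv_inner_eq (Colonne Ligne : Int) (Symbole : String) (P : List (List String))
    (rowL : List String) (hrow : PySem.List.pyGet? P Ligne = some rowL)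
    (hPre2 : ∀ d ∈ ([-3, -2, -1, 0, 1, 2, 3] : List Int),
      (0 ≤ Colonne + d ∧ 0 ≤ Ligne - d ∧ Ligne - d < (P.length : Int) ∧
        Colonne + d < (((PySem.List.pyGet? P Ligne).getD []).length : Int)) →
      Colonne + d < (((PySem.List.pyGet? P (Ligne - d)).getD []).length : Int))
    (d : Int) (hd1 : -3 ≤ d) (hd2 : d ≤ 3) (iC : Int) (hiC : iC = Colonne + d) (st : Bool × Int) :
    (PySem.List.pyRange (Ligne + 3) (Ligne - 4) (-1)).foldl
        (pvStepA Colonne Ligne Symbole P iC) (some st) =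
      some (pvStepB Colonne Ligne Symbole P st d) := by
  subst hiC
  rw [pv_inner_list]
  simp only [List.foldl_cons, List.foldl_nil]
  have hP2 := hPre2 d (by interval_cases d <;> simp)
  interval_cases d
  · rw [pvStepA_diag Colonne Ligne Symbole P rowL hrow (-3) hP2 _ (Ligne + 3) (by ring) (by ring)]
    rw [pvStepA_noop Colonne Ligne Symbole P rowL hrow _ (Ligne + 2) (by omega)]
    rw [pvStepA_noop Colonne Ligne Symbole P rowL hrow _ (Ligne + 1) (by omega)]
    rw [pvStepA_noop Colonne Ligne Symbole P rowL hrow _ Ligne (by omega)]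
    rw [pvStepA_noop Colonne Ligne Symbole P rowL hrow _ (Ligne - 1) (by omega)]
    rw [pvStepA_noop Colonne Ligne Symbole P rowL hrow _ (Ligne - 2) (by omega)]
    rw [pvStepA_noop Colonne Ligne Symbole P rowL hrow _ (Ligne - 3) (by omega)]
  · rw [pvStepA_noop Colonne Ligne Symbole P rowL hrow _ (Ligne + 3) (by omega)]
    rw [pvStepA_diag Colonne Ligne Symbole P rowL hrow (-2) hP2 _ (Ligne + 2) (by ring) (by ring)]
    rw [pvStepA_noop Colonne Ligne Symbole P rowL hrow _ (Ligne + 1) (by omega)]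
    rw [pvStepA_noop Colonne Ligne Symbole P rowL hrow _ Ligne (by omega)]
    rw [pvStepA_noop Colonne Ligne Symbole P rowL hrow _ (Ligne - 1) (by omega)]
    rw [pvStepA_noop Colonne Ligne Symbole P rowL hrow _ (Ligne - 2) (by omega)]
    rw [pvStepA_noop Colonne Ligne Symbole P rowL hrow _ (Ligne - 3) (by omega)]
  · rw [pvStepA_noop Colonne Ligne Symbole P rowL hrow _ (Ligne + 3) (by omega)]
    rw [pvStepA_noop Colonne Ligne Symbole P rowL hrow _ (Ligne + 2) (by omega)]
    rw [pvStepA_diag Colonne Ligne Symbole P rowL hrow (-1) hP2 _ (Ligne + 1) (by ring) (by ring)]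
    rw [pvStepA_noop Colonne Ligne Symbole P rowL hrow _ Ligne (by omega)]
    rw [pvStepA_noop Colonne Ligne Symbole P rowL hrow _ (Ligne - 1) (by omega)]
    rw [pvStepA_noop Colonne Ligne Symbole P rowL hrow _ (Ligne - 2) (by omega)]
    rw [pvStepA_noop Colonne Ligne Symbole P rowL hrow _ (Ligne - 3) (by omega)]
  · rw [pvStepA_noop Colonne Ligne Symbole P rowL hrow _ (Ligne + 3) (by omega)]
    rw [pvStepA_noop Colonne Ligne Symbole P rowL hrow _ (Ligne + 2) (by omega)]
    rw [pvStepA_noop Colonne Ligne Symbole P rowL hrow _ (Ligne + 1) (by omega)]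
    rw [pvStepA_diag Colonne Ligne Symbole P rowL hrow (0) hP2 _ Ligne (by ring) (by ring)]
    rw [pvStepA_noop Colonne Ligne Symbole P rowL hrow _ (Ligne - 1) (by omega)]
    rw [pvStepA_noop Colonne Ligne Symbole P rowL hrow _ (Ligne - 2) (by omega)]
    rw [pvStepA_noop Colonne Ligne Symbole P rowL hrow _ (Ligne - 3) (by omega)]
  · rw [pvStepA_noop Colonne Ligne Symbole P rowL hrow _ (Ligne + 3) (by omega)]
    rw [pvStepA_noop Colonne Ligne Symbole P rowL hrow _ (Ligne + 2) (by omega)]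
    rw [pvStepA_noop Colonne Ligne Symbole P rowL hrow _ (Ligne + 1) (by omega)]
    rw [pvStepA_noop Colonne Ligne Symbole P rowL hrow _ Ligne (by omega)]
    rw [pvStepA_diag Colonne Ligne Symbole P rowL hrow (1) hP2 _ (Ligne - 1) (by ring) (by ring)]
    rw [pvStepA_noop Colonne Ligne Symbole P rowL hrow _ (Ligne - 2) (by omega)]
    rw [pvStepA_noop Colonne Ligne Symbole P rowL hrow _ (Ligne - 3) (by omega)]
  · rw [pvStepA_noop Colonne Ligne Symbole P rowL hrow _ (Ligne + 3) (by omega)]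
    rw [pvStepA_noop Colonne Ligne Symbole P rowL hrow _ (Ligne + 2) (by omega)]
    rw [pvStepA_noop Colonne Ligne Symbole P rowL hrow _ (Ligne + 1) (by omega)]
    rw [pvStepA_noop Colonne Ligne Symbole P rowL hrow _ Ligne (by omega)]
    rw [pvStepA_noop Colonne Ligne Symbole P rowL hrow _ (Ligne - 1) (by omega)]
    rw [pvStepA_diag Colonne Ligne Symbole P rowL hrow (2) hP2 _ (Ligne - 2) (by ring) (by ring)]
    rw [pvStepA_noop Colonne Ligne Symbole P rowL hrow _ (Ligne - 3) (by omega)]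
  · rw [pvStepA_noop Colonne Ligne Symbole P rowL hrow _ (Ligne + 3) (by omega)]
    rw [pvStepA_noop Colonne Ligne Symbole P rowL hrow _ (Ligne + 2) (by omega)]
    rw [pvStepA_noop Colonne Ligne Symbole P rowL hrow _ (Ligne + 1) (by omega)]
    rw [pvStepA_noop Colonne Ligne Symbole P rowL hrow _ Ligne (by omega)]
    rw [pvStepA_noop Colonne Ligne Symbole P rowL hrow _ (Ligne - 1) (by omega)]
    rw [pvStepA_noop Colonne Ligne Symbole P rowL hrow _ (Ligne - 2) (by omega)]
    rw [pvStepA_diag Colonne Ligne Symbole P rowL hrow (3) hP2 _ (Ligne - 3) (by ring) (by ring)]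

theorem pv_Brange : PySem.List.pyRange (-3) 4 1 = ([-3, -2, -1, 0, 1, 2, 3] : List Int) := by
  decide

theorem pv_spec_aux (Colonne Ligne : Int) (Symbole : String) (P : List (List String))
    (hPre : Pre_verification_diagonale_basgauche_hautedroite Colonne Ligne Symbole P) :
    verification_diagonale_basgauche_hautedroite Colonne Ligne Symbole P =
      verification_diagonale_basgauche_hautedroite_alt Colonne Ligne Symbole P := by
  obtain ⟨h1, hPre2⟩ := hPre
  unfold verification_diagonale_basgauche_hautedroite verification_diagonale_basgauche_hautedroite_alt
  rw [pv_Brange]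
  by_cases hval : -(P.length : Int) ≤ Ligne ∧ Ligne < (P.length : Int)
  · -- row Ligne exists: A's scan processes exactly the 7 anti-diagonal cells, in B's order
    obtain ⟨rowL, hrow⟩ : ∃ rowL, PySem.List.pyGet? P Ligne = some rowL := by
      cases hq : PySem.List.pyGet? P Ligne with
      | none =>
        rw [PySem.List.pyGet?_eq_none_iff] at hq
        exact absurd (by simpa [PySem.Raise.InRange] using hval) hq
      | some rowL => exact ⟨rowL, rfl⟩
    rw [pv_outer_list]
    simp only [List.foldl_cons, List.foldl_nil]
    rw [pv_inner_eq Colonne Ligne Symbole P rowL hrow hPre2 (-3) (by omega) (by omega) _ (by ring),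
        pv_inner_eq Colonne Ligne Symbole P rowL hrow hPre2 (-2) (by omega) (by omega) _ (by ring),
        pv_inner_eq Colonne Ligne Symbole P rowL hrow hPre2 (-1) (by omega) (by omega) _ (by ring),
        pv_inner_eq Colonne Ligne Symbole P rowL hrow hPre2 0 (by omega) (by omega) _ (by ring),
        pv_inner_eq Colonne Ligne Symbole P rowL hrow hPre2 1 (by omega) (by omega) _ (by ring),
        pv_inner_eq Colonne Ligne Symbole P rowL hrow hPre2 2 (by omega) (by omega) _ (by ring),
        pv_inner_eq Colonne Ligne Symbole P rowL hrow hPre2 3 (by omega) (by omega) _ (by ring)]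
  · -- Ligne far outside: no cell ever passes the bounds guard; both scans are no-ops
    have hfar : Colonne < -3 ∨ Ligne < -3 ∨ Ligne > (P.length : Int) + 2 ∨ P.length = 0 := by
      rcases h1 with h | h; · exact absurd h hval
      exact h
    rw [pvFoldlFix, pvFoldlFix]
    · intro d hd
      have hdb : -3 ≤ d ∧ d ≤ 3 := by
        simp only [List.mem_cons, List.not_mem_nil, or_false] at hd
        rcases hd with rfl | rfl | rfl | rfl | rfl | rfl | rfl; all_goals omega
      exact pvStepB_oob Colonne Ligne Symbole P d (by omega) (false, 0)
    · intro iC hiC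
      have hib : Colonne - 3 ≤ iC ∧ iC ≤ Colonne + 3 := by
        rw [pv_outer_list] at hiC
        simp only [List.mem_cons, List.not_mem_nil, or_false] at hiC
        rcases hiC with rfl | rfl | rfl | rfl | rfl | rfl | rfl; all_goals omega
      apply pvFoldlFix
      intro iL hiL
      have hlb : Ligne - 3 ≤ iL ∧ iL ≤ Ligne + 3 := by
        rw [pv_inner_list] at hiL
        simp only [List.mem_cons, List.not_mem_nil, or_false] at hiL
        rcases hiL with rfl | rfl | rfl | rfl | rfl | rfl | rfl; all_goals omega
      exact pvStepA_oob Colonne Ligne Symbole P iC iL (by omega) (false, 0)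

-- ===== VERDICT (by name: the statement is the Claim_ definition above) =====
theorem verification_diagonale_basgauche_hautedroite_spec : Claim_equal_verification_diagonale_basgauche_hautedroite := by
  intro Colonne Ligne Symbole P _ hPre
  exact pv_spec_aux Colonne Ligne Symbole P hPre
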